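-- pv_equiv track=rewrite | github.com/kumarsoubackup-sys/Miro | scripts/normalize_options_chain_snapshot.py | _canonical_key
-- ===== SOURCE A (Python) =====
-- HEADER_ALIASES = {
--     "option_symbol": ["option_symbol", "option symbol", "contract", "contract name", "symbol"],
--     "underlying": ["underlying", "ticker", "root"],
--     "underlying_price": ["underlying_price", "underlying price", "price", "stock price"],
--     "currency": ["currency"],
--     "expiry": ["expiry", "expiration", "expiration date", "exp date"],
--     "days_to_expiry": ["days_to_expiry", "dte", "days"],
--     "right": ["right", "type", "option type", "call/put", "cp"],
--     "strike": ["strike", "strike price"],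
--     "bid": ["bid"],
--     "ask": ["ask"],
--     "last": ["last", "last price"],
--     "mark": ["mark", "mid", "midpoint"],
--     "volume": ["volume", "vol"],
--     "open_interest": ["open interest", "open_interest", "oi"],
--     "implied_volatility": ["implied volatility", "implied_volatility", "iv", "imp vol"],
--     "delta": ["delta"],
--     "gamma": ["gamma"],
--     "theta": ["theta"],
--     "vega": ["vega"],
--     "in_the_money": ["in the money", "in_the_money", "itm"],
-- }
--
-- def _normalize_header(value: str) -> str:
--     return (
--         value.strip()
--         .lower()
--         .replace("_", " ")
--         .replace("-", " ")
--         .replace("/", " ")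
--     )
--
-- def _canonical_key(header: str) -> str:
--     normalized = _normalize_header(header)
--     for canonical, aliases in HEADER_ALIASES.items():
--         if normalized == _normalize_header(canonical):
--             return canonical
--         for alias in aliases:
--             if normalized == _normalize_header(alias):
--                 return canonical
--     return header
-- ===== SOURCE B (Python) =====
-- _TRANS = str.maketrans("_-/", "   ")
--
-- # Normalized header (stripped, lowercased, with _ - / mapped to spaces) -> canonical key.
-- _NORM_TO_CANONICAL = {
--     'option symbol': 'option_symbol',
--     'contract': 'option_symbol',
--     'contract name': 'option_symbol',
--     'symbol': 'option_symbol',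
--     'underlying': 'underlying',
--     'ticker': 'underlying',
--     'root': 'underlying',
--     'underlying price': 'underlying_price',
--     'price': 'underlying_price',
--     'stock price': 'underlying_price',
--     'currency': 'currency',
--     'expiry': 'expiry',
--     'expiration': 'expiry',
--     'expiration date': 'expiry',
--     'exp date': 'expiry',
--     'days to expiry': 'days_to_expiry',
--     'dte': 'days_to_expiry',
--     'days': 'days_to_expiry',
--     'right': 'right',
--     'type': 'right',
--     'option type': 'right',
--     'call put': 'right',
--     'cp': 'right',
--     'strike': 'strike',
--     'strike price': 'strike',
--     'bid': 'bid',
--     'ask': 'ask',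
--     'last': 'last',
--     'last price': 'last',
--     'mark': 'mark',
--     'mid': 'mark',
--     'midpoint': 'mark',
--     'volume': 'volume',
--     'vol': 'volume',
--     'open interest': 'open_interest',
--     'oi': 'open_interest',
--     'implied volatility': 'implied_volatility',
--     'iv': 'implied_volatility',
--     'imp vol': 'implied_volatility',
--     'delta': 'delta',
--     'gamma': 'gamma',
--     'theta': 'theta',
--     'vega': 'vega',
--     'in the money': 'in_the_money',
--     'itm': 'in_the_money',
-- }
--
-- def _canonical_key(header: str) -> str:
--     normalized = header.strip().lower().translate(_TRANS)
--     return _NORM_TO_CANONICAL.get(normalized, header)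
-- ===== Notes on version B (the rewrite author's own statement) =====
-- stated objective: idiomatic
-- what changed: Replaced the per-call nested scan that re-normalizes every canonical and alias with a precomputed literal dict from normalized name to canonical key (first-wins precedence preserved) and a single-pass str.translate normalization, so each call is one normalization plus one dict lookup.
import Mathlib
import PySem

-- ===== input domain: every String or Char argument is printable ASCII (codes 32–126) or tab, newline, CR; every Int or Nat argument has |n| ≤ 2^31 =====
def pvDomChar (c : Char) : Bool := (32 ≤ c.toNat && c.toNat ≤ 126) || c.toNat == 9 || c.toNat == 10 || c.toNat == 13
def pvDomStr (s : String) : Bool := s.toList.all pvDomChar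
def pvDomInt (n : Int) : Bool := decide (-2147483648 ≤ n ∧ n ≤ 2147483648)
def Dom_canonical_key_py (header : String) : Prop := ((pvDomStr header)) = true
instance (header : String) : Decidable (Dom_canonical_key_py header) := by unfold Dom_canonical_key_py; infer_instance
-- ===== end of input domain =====

-- B replaces A's per-call nested scan (re-normalizing every canonical and alias on every call)
-- with a precomputed literal lookup table and a one-pass translate normalization: idiomatic.

-- ===== PORT A =====
def HEADER_ALIASES : List (String × List String) := [
  ("option_symbol", ["option_symbol", "option symbol", "contract", "contract name", "symbol"]),
  ("underlying", ["underlying", "ticker", "root"]),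
  ("underlying_price", ["underlying_price", "underlying price", "price", "stock price"]),
  ("currency", ["currency"]),
  ("expiry", ["expiry", "expiration", "expiration date", "exp date"]),
  ("days_to_expiry", ["days_to_expiry", "dte", "days"]),
  ("right", ["right", "type", "option type", "call/put", "cp"]),
  ("strike", ["strike", "strike price"]),
  ("bid", ["bid"]),
  ("ask", ["ask"]),
  ("last", ["last", "last price"]),
  ("mark", ["mark", "mid", "midpoint"]),
  ("volume", ["volume", "vol"]),
  ("open_interest", ["open interest", "open_interest", "oi"]),
  ("implied_volatility", ["implied volatility", "implied_volatility", "iv", "imp vol"]),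
  ("delta", ["delta"]),
  ("gamma", ["gamma"]),
  ("theta", ["theta"]),
  ("vega", ["vega"]),
  ("in_the_money", ["in the money", "in_the_money", "itm"])]

-- _normalize_header: strip().lower().replace("_"," ").replace("-"," ").replace("/"," ")
def normalize_header (value : String) : String :=
  PySem.Str.replace
    (PySem.Str.replace
      (PySem.Str.replace (PySem.Str.lower (PySem.Str.strip value)) "_" " ")
      "-" " ")
    "/" " "

-- inner 'for alias in aliases' loop: does some alias normalize to `normalized`?
def aliasLoop (normalized : String) : List String → Bool
  | [] => false
  | a :: rest => if normalized == normalize_header a then true else aliasLoop normalized rest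

-- outer 'for canonical, aliases in HEADER_ALIASES.items()' loop, falling back to header
def canonKeyLoop (normalized header : String) : List (String × List String) → String
  | [] => header
  | (canonical, aliases) :: rest =>
    if normalized == normalize_header canonical then canonical
    else if aliasLoop normalized aliases then canonical
    else canonKeyLoop normalized header rest

def canonical_key_py (header : String) : String :=
  canonKeyLoop (normalize_header header) header HEADER_ALIASES

-- ===== PORT B =====
-- str.maketrans("_-/", "   "): a single-char translation table; exact on these ASCII chars
def transChar (ch : Char) : Char := if ch = '_' ∨ ch = '-' ∨ ch = '/' then ' ' else ch

-- header.strip().lower().translate(_TRANS)  (translate = per-code-point map through the table)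
def normalizeTranslated (header : String) : String :=
  String.ofList ((PySem.Str.lower (PySem.Str.strip header)).toList.map transChar)

-- _NORM_TO_CANONICAL: the literal dict from Source B (normalized name -> canonical key)
def NORM_TO_CANONICAL : PySem.Dict String String := PySem.Dict.mk [
  ("option symbol", "option_symbol"),
  ("contract", "option_symbol"),
  ("contract name", "option_symbol"),
  ("symbol", "option_symbol"),
  ("underlying", "underlying"),
  ("ticker", "underlying"),
  ("root", "underlying"),
  ("underlying price", "underlying_price"),
  ("price", "underlying_price"),
  ("stock price", "underlying_price"),
  ("currency", "currency"),
  ("expiry", "expiry"),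
  ("expiration", "expiry"),
  ("expiration date", "expiry"),
  ("exp date", "expiry"),
  ("days to expiry", "days_to_expiry"),
  ("dte", "days_to_expiry"),
  ("days", "days_to_expiry"),
  ("right", "right"),
  ("type", "right"),
  ("option type", "right"),
  ("call put", "right"),
  ("cp", "right"),
  ("strike", "strike"),
  ("strike price", "strike"),
  ("bid", "bid"),
  ("ask", "ask"),
  ("last", "last"),
  ("last price", "last"),
  ("mark", "mark"),
  ("mid", "mark"),
  ("midpoint", "mark"),
  ("volume", "volume"),
  ("vol", "volume"),
  ("open interest", "open_interest"),
  ("oi", "open_interest"),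
  ("implied volatility", "implied_volatility"),
  ("iv", "implied_volatility"),
  ("imp vol", "implied_volatility"),
  ("delta", "delta"),
  ("gamma", "gamma"),
  ("theta", "theta"),
  ("vega", "vega"),
  ("in the money", "in_the_money"),
  ("itm", "in_the_money")]

def canonical_key_py_alt (header : String) : String :=
  NORM_TO_CANONICAL.getD (normalizeTranslated header) header

-- ===== PRECONDITION & SPEC =====
def Spec_canonical_key_py (header : String) (out : String) : Prop := out = canonical_key_py_alt header
instance (header : String) (out : String) : Decidable (Spec_canonical_key_py header out) := by unfold Spec_canonical_key_py; infer_instance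

-- ===== CLAIM (what is proved, stated in full; the proofs are below) =====
def Claim_equal_canonical_key_py : Prop := ∀ (header : String), Dom_canonical_key_py header → Spec_canonical_key_py header (canonical_key_py header)

-- ===== LEMMAS AND PROOFS =====

-- replacing a single char by a single char is a per-char map
theorem replace_go_single (c d : Char) (l acc : List Char) (fuel : Nat) (h : l.length ≤ fuel) :
    PySem.Chars.replace.go [c] [d] fuel l acc
      = acc.reverse ++ l.map (fun ch => if ch = c then d else ch) := by
  induction l generalizing fuel acc with
  | nil => cases fuel <;> simp [PySem.Chars.replace.go]
  | cons x t ih =>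
    cases fuel with
    | zero => simp at h
    | succ fuel =>
      simp only [PySem.Chars.replace.go]
      by_cases hx : x = c
      · subst hx
        rw [if_pos (by simp [List.isPrefixOf])]
        have hih := ih (d :: acc) fuel (by simpa using h)
        simpa using hih
      · rw [if_neg (by simp [List.isPrefixOf, Ne.symm hx])]
        have hih := ih (x :: acc) fuel (by simpa using h)
        simpa [hx] using hih

theorem replace_single (cs : List Char) (c d : Char) :
    PySem.Chars.replace cs [c] [d] = cs.map (fun ch => if ch = c then d else ch) := by
  rw [PySem.Chars.replace]
  simp only [List.isEmpty_cons]
  rw [replace_go_single c d cs [] cs.length le_rfl]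
  simp

-- the three single-char replaces compose into the translate table
theorem comp_eq_transChar :
    (((fun ch => if ch = '/' then ' ' else ch) ∘ (fun ch => if ch = '-' then ' ' else ch)) ∘
      (fun ch => if ch = '_' then ' ' else ch)) = transChar := by
  funext ch
  simp only [Function.comp, transChar]
  by_cases h1 : ch = '_' <;> by_cases h2 : ch = '-' <;> by_cases h3 : ch = '/' <;>
    simp_all

-- A's normalization equals B's one-pass translate normalization
theorem normHeader_eq_translated (s : String) : normalize_header s = normalizeTranslated s := by
  have h : ((PySem.Str.lower (PySem.Str.strip s)).toList.map transChar)
      = (normalize_header s).toList := by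
    have e1 : "_".toList = ['_'] := rfl
    have e2 : "-".toList = ['-'] := rfl
    have e3 : "/".toList = ['/'] := rfl
    have e4 : " ".toList = [' '] := rfl
    simp only [normalize_header, PySem.Str.toList_replace, e1, e2, e3, e4]
    rw [replace_single, replace_single, replace_single, List.map_map, List.map_map,
      comp_eq_transChar]
  rw [normalizeTranslated, h, String.ofList_toList]

-- A's scan result as an Option (none = fall through to the original header)
def scanOpt (n : String) : List (String × List String) → Option String
  | [] => none
  | (c, al) :: rest =>
    if n == normalize_header c || aliasLoop n al then some c else scanOpt n rest

theorem canonKeyLoop_eq_scanOpt (n header : String) (L : List (String × List String)) :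
    canonKeyLoop n header L = (scanOpt n L).getD header := by
  induction L with
  | nil => rfl
  | cons p rest ih =>
    obtain ⟨c, al⟩ := p
    simp only [canonKeyLoop, scanOpt, Bool.or_eq_true]
    split_ifs with h1 h2 h3 h3 <;> simp_all

-- first-match lookup in a plain association list
def find1 (n : String) : List (String × String) → Option String
  | [] => none
  | (k, v) :: rest => if n = k then some v else find1 n rest

-- each HEADER_ALIASES group flattened to (normalized name, canonical) pairs
def flat1 (p : String × List String) : List (String × String) :=
  (normalize_header p.1, p.1) :: p.2.map (fun a => (normalize_header a, p.1))

theorem find1_map_aliases (n c : String) (al : List String) :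
    find1 n (al.map (fun a => (normalize_header a, c)))
      = if aliasLoop n al then some c else none := by
  induction al with
  | nil => simp [find1, aliasLoop]
  | cons a rest ih =>
    simp only [List.map, find1, aliasLoop, beq_iff_eq]
    split_ifs <;> simp_all

theorem find1_append (n : String) (l1 l2 : List (String × String)) :
    find1 n (l1 ++ l2) = Option.or (find1 n l1) (find1 n l2) := by
  induction l1 with
  | nil => simp [find1, Option.or]
  | cons p rest ih =>
    obtain ⟨k, v⟩ := p
    simp only [List.cons_append, find1]
    split_ifs <;> simp [ih, Option.or]

theorem scanOpt_eq_find1_flat (n : String) (L : List (String × List String)) :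
    scanOpt n L = find1 n (L.flatMap flat1) := by
  induction L with
  | nil => rfl
  | cons p rest ih =>
    obtain ⟨c, al⟩ := p
    simp only [scanOpt, List.flatMap_cons, flat1, find1, List.cons_append]
    rw [find1_append]
    rw [find1_map_aliases]
    by_cases h1 : n = normalize_header c <;> by_cases h2 : aliasLoop n al <;>
      simp [h1, h2, ih, Option.or]

-- first-wins key dedup (tracking seen keys) does not change first-match lookup
def dedupKeys (seen : List String) : List (String × String) → List (String × String)
  | [] => []
  | (k, v) :: rest =>
    if seen.contains k then dedupKeys seen rest else (k, v) :: dedupKeys (k :: seen) rest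

theorem find1_dedupKeys (n : String) (seen : List String) (l : List (String × String))
    (hn : ¬ seen.contains n = true) : find1 n (dedupKeys seen l) = find1 n l := by
  induction l generalizing seen with
  | nil => rfl
  | cons p rest ih =>
    obtain ⟨k, v⟩ := p
    by_cases hn2 : n = k
    · subst hn2
      rw [dedupKeys, if_neg hn, find1, if_pos rfl, find1, if_pos rfl]
    · simp only [dedupKeys, find1, if_neg hn2]
      split_ifs with hk
      · exact ih seen hn
      · rw [find1, if_neg hn2, ih (k :: seen) (by simp_all)]

-- B's dict lookup is first-match lookup on its items list
theorem get?_mk_eq_find1 (n : String) (l : List (String × String)) :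
    (PySem.Dict.mk l).get? n = find1 n l := by
  induction l with
  | nil => simp [pysem, find1]
  | cons p rest ih =>
    obtain ⟨k, v⟩ := p
    rw [PySem.Dict.get?_mk_cons, find1]
    by_cases h : n = k
    · simp [h]
    · simp [beq_iff_eq, h, Ne.symm h, ih]

-- the flattening of HEADER_ALIASES, fully evaluated (a closed computation)
def FLATLIST : List (String × String) := [
  ("option symbol", "option_symbol"),
  ("option symbol", "option_symbol"),
  ("option symbol", "option_symbol"),
  ("contract", "option_symbol"),
  ("contract name", "option_symbol"),
  ("symbol", "option_symbol"),
  ("underlying", "underlying"),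
  ("underlying", "underlying"),
  ("ticker", "underlying"),
  ("root", "underlying"),
  ("underlying price", "underlying_price"),
  ("underlying price", "underlying_price"),
  ("underlying price", "underlying_price"),
  ("price", "underlying_price"),
  ("stock price", "underlying_price"),
  ("currency", "currency"),
  ("currency", "currency"),
  ("expiry", "expiry"),
  ("expiry", "expiry"),
  ("expiration", "expiry"),
  ("expiration date", "expiry"),
  ("exp date", "expiry"),
  ("days to expiry", "days_to_expiry"),
  ("days to expiry", "days_to_expiry"),
  ("dte", "days_to_expiry"),
  ("days", "days_to_expiry"),
  ("right", "right"),
  ("right", "right"),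
  ("type", "right"),
  ("option type", "right"),
  ("call put", "right"),
  ("cp", "right"),
  ("strike", "strike"),
  ("strike", "strike"),
  ("strike price", "strike"),
  ("bid", "bid"),
  ("bid", "bid"),
  ("ask", "ask"),
  ("ask", "ask"),
  ("last", "last"),
  ("last", "last"),
  ("last price", "last"),
  ("mark", "mark"),
  ("mark", "mark"),
  ("mid", "mark"),
  ("midpoint", "mark"),
  ("volume", "volume"),
  ("volume", "volume"),
  ("vol", "volume"),
  ("open interest", "open_interest"),
  ("open interest", "open_interest"),
  ("open interest", "open_interest"),
  ("oi", "open_interest"),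
  ("implied volatility", "implied_volatility"),
  ("implied volatility", "implied_volatility"),
  ("implied volatility", "implied_volatility"),
  ("iv", "implied_volatility"),
  ("imp vol", "implied_volatility"),
  ("delta", "delta"),
  ("delta", "delta"),
  ("gamma", "gamma"),
  ("gamma", "gamma"),
  ("theta", "theta"),
  ("theta", "theta"),
  ("vega", "vega"),
  ("vega", "vega"),
  ("in the money", "in_the_money"),
  ("in the money", "in_the_money"),
  ("in the money", "in_the_money"),
  ("itm", "in_the_money")]

set_option maxHeartbeats 1000000 in
set_option maxRecDepth 4096 in
theorem flat_eq : HEADER_ALIASES.flatMap flat1 = FLATLIST := by decide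

-- the precomputed literal table IS the first-wins dedup of that flattening
set_option maxHeartbeats 2000000 in
set_option maxRecDepth 8192 in
theorem ded_eq : PySem.Dict.mk (dedupKeys [] FLATLIST) = NORM_TO_CANONICAL := by decide

-- ===== VERDICT (by name: the statement is the Claim_ definition above) =====
theorem canonical_key_py_spec : Claim_equal_canonical_key_py := by
  intro header _
  show canonical_key_py header = canonical_key_py_alt header
  rw [canonical_key_py, canonical_key_py_alt, canonKeyLoop_eq_scanOpt,
    scanOpt_eq_find1_flat, flat_eq, ← find1_dedupKeys _ [] _ (by simp),
    ← get?_mk_eq_find1, ded_eq, PySem.Dict.getD_eq_get?_getD, normHeader_eq_translated]
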